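-- pv_equiv track=rewrite | github.com/gnodwell/Cloud-Computing | Assignment2/reports.py | getTenYearInt
-- ===== SOURCE A (Python) =====
-- def getTenYearInt(data, country, year) :
--     hold = {
--             'Country': '',
--             '1': '',
--             '2': '',
--             '3': '',
--             '4': '',
--             '5': '',
--             '6': '',
--             '7': '',
--             '8': '',
--             '9': '',
--             '10': ''
--             }
--     for x in data :
--         if (x.get("Country") == country) :
--             hold['Country'] = x.get('Country')
--             if (x.get('Year') == str(year)) :
--                 hold['1'] = x.get('gdppc')
--             if (x.get('Year') == str(year+1)) :
--                 hold['2'] = x.get('gdppc')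
--             if (x.get('Year') == str(year+2)) :
--                 hold['3'] = x.get('gdppc')
--             if (x.get('Year') == str(year+3)) :
--                 hold['4'] = x.get('gdppc')
--             if (x.get('Year') == str(year+4)) :
--                 hold['5'] = x.get('gdppc')
--             if (x.get('Year') == str(year+5)) :
--                 hold['6'] = x.get('gdppc')
--             if (x.get('Year') == str(year+6)) :
--                 hold['7'] = x.get('gdppc')
--             if (x.get('Year') == str(year+7)) :
--                 hold['8'] = x.get('gdppc')
--             if (x.get('Year') == str(year+8)) :
--                 hold['9'] = x.get('gdppc')
--             if (x.get('Year') == str(year+9)) :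
--                 hold['10'] = x.get('gdppc')
--     return hold
-- ===== SOURCE B (Python) =====
-- def getTenYearInt(data, country, year):
--     # One pass building a Year -> gdppc index for the matching country
--     # (later rows overwrite earlier ones, like A's repeated assignments),
--     # then a flat ten-lookup pass instead of ten comparisons per row.
--     idx = {}
--     seen = False
--     for x in data:
--         if x.get("Country") == country:
--             seen = True
--             if "Year" in x:
--                 idx[x["Year"]] = x.get("gdppc")
--     hold = {"Country": country if seen else ""}
--     for i in range(10):
--         y = str(year + i)
--         hold[str(i + 1)] = idx[y] if y in idx else ""
--     return hold
-- ===== Notes on version B (the rewrite author's own statement) =====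
-- stated objective: simpler
-- what changed: B replaces A's per-row chain of ten string comparisons with one pass that builds a Year->gdppc index for the matching country (plus a seen flag) and a flat ten-lookup pass that fills the result.
import Mathlib
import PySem

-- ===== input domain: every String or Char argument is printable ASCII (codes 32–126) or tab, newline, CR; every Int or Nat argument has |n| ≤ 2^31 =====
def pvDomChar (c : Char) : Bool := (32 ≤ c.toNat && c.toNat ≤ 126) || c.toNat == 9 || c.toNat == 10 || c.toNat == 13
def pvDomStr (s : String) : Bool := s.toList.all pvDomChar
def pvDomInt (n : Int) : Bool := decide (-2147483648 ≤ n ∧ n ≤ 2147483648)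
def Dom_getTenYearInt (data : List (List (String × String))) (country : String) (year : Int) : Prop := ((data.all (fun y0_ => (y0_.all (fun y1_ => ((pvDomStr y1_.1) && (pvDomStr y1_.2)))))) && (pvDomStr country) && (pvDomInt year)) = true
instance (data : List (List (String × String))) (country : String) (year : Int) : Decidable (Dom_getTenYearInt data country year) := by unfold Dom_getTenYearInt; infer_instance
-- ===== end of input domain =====

-- B builds a Year→gdppc index for the matching country in one pass, then fills the ten slots by lookup,
-- instead of A's ten string comparisons per row; return value only (neither mutates its arguments).

-- ===== PORT A =====
-- loop body of A, extracted as a helper; rows (Python dicts) are read through PySem.Dict.ofList.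
-- EXACT on Pre_: A stores x.get('gdppc') / x.get('Country'), ported as getD … "" — Pre_ guarantees the key
-- is present wherever the stored value can reach the result.
def pvStepA (country : String) (year : Int) (hold : PySem.Dict String String) (x : List (String × String)) : PySem.Dict String String :=
  let d := PySem.Dict.ofList x
  if d.get? "Country" == some country then
    let hold := hold.insert "Country" (d.getD "Country" "")
    let hold := if d.get? "Year" == some (PySem.Int.toStr (year)) then hold.insert "1" (d.getD "gdppc" "") else hold
    let hold := if d.get? "Year" == some (PySem.Int.toStr (year+1)) then hold.insert "2" (d.getD "gdppc" "") else hold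
    let hold := if d.get? "Year" == some (PySem.Int.toStr (year+2)) then hold.insert "3" (d.getD "gdppc" "") else hold
    let hold := if d.get? "Year" == some (PySem.Int.toStr (year+3)) then hold.insert "4" (d.getD "gdppc" "") else hold
    let hold := if d.get? "Year" == some (PySem.Int.toStr (year+4)) then hold.insert "5" (d.getD "gdppc" "") else hold
    let hold := if d.get? "Year" == some (PySem.Int.toStr (year+5)) then hold.insert "6" (d.getD "gdppc" "") else hold
    let hold := if d.get? "Year" == some (PySem.Int.toStr (year+6)) then hold.insert "7" (d.getD "gdppc" "") else hold
    let hold := if d.get? "Year" == some (PySem.Int.toStr (year+7)) then hold.insert "8" (d.getD "gdppc" "") else hold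
    let hold := if d.get? "Year" == some (PySem.Int.toStr (year+8)) then hold.insert "9" (d.getD "gdppc" "") else hold
    let hold := if d.get? "Year" == some (PySem.Int.toStr (year+9)) then hold.insert "10" (d.getD "gdppc" "") else hold
    hold
  else hold

def getTenYearInt (data : List (List (String × String))) (country : String) (year : Int) : List (String × String) :=
  (data.foldl (pvStepA country year) (PySem.Dict.mk [("Country", ""), ("1", ""), ("2", ""), ("3", ""), ("4", ""), ("5", ""), ("6", ""), ("7", ""), ("8", ""), ("9", ""), ("10", "")])).items

-- ===== PORT B =====
-- loop body of B: index Year→gdppc over rows of the requested country, plus a 'seen' flag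
def pvStepB (country : String) (p : PySem.Dict String String × Bool) (x : List (String × String)) : PySem.Dict String String × Bool :=
  let d := PySem.Dict.ofList x
  if d.get? "Country" == some country then
    (match d.get? "Year" with
     | some y => p.1.insert y (d.getD "gdppc" "")
     | none => p.1, true)
  else p

def getTenYearInt_alt (data : List (List (String × String))) (country : String) (year : Int) : List (String × String) :=
  let p := data.foldl (pvStepB country) (PySem.Dict.empty, false)
  ((PySem.List.pyRange 0 10 1).foldl
    (fun hold i => hold.insert (PySem.Int.toStr (i+1))
      (match p.1.get? (PySem.Int.toStr (year+i)) with | some v => v | none => ""))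
    (PySem.Dict.mk [("Country", if p.2 then country else "")])).items

-- ===== PRECONDITION & SPEC =====
-- Pre_ excludes inputs where some row of the requested country carries a Year inside the ten-year window but
-- no 'gdppc' key: there Python A returns None in the dict, which is not a String of the declared value type.
def Pre_getTenYearInt (data : List (List (String × String))) (country : String) (year : Int) : Prop :=
  ∀ x ∈ data,
    ((PySem.Dict.ofList x).get? "Country" = some country ∧
     ∃ i ∈ List.range 10, (PySem.Dict.ofList x).get? "Year" = some (PySem.Int.toStr (year + (i : Int)))) →
    ((PySem.Dict.ofList x).get? "gdppc").isSome = true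
instance (data : List (List (String × String))) (country : String) (year : Int) : Decidable (Pre_getTenYearInt data country year) := by unfold Pre_getTenYearInt; infer_instance

def pvWitness_getTenYearInt : (List (List (String × String))) × String × Int :=
  ([[("Country", "a"), ("Year", "5"), ("gdppc", "7")]], "a", 5)

def Spec_getTenYearInt (data : List (List (String × String))) (country : String) (year : Int) (out : List (String × String)) : Prop := out = getTenYearInt_alt data country year
instance (data : List (List (String × String))) (country : String) (year : Int) (out : List (String × String)) : Decidable (Spec_getTenYearInt data country year out) := by unfold Spec_getTenYearInt; infer_instance

-- ===== CLAIM (what is proved, stated in full; the proofs are below) =====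
def Claim_equal_getTenYearInt : Prop := ∀ (data : List (List (String × String))) (country : String) (year : Int), Dom_getTenYearInt data country year → Pre_getTenYearInt data country year → Spec_getTenYearInt data country year (getTenYearInt data country year)

-- ===== LEMMAS AND PROOFS =====
-- abbreviations for row reads
def pvRM (country : String) (x : List (String × String)) : Bool := (PySem.Dict.ofList x).get? "Country" == some country
def pvYE (y : String) (x : List (String × String)) : Bool := (PySem.Dict.ofList x).get? "Year" == some y
def pvGD (x : List (String × String)) : String := (PySem.Dict.ofList x).getD "gdppc" ""
def pvCC (x : List (String × String)) : String := (PySem.Dict.ofList x).getD "Country" ""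
-- reference value of each slot: last matching write wins (A's repeated assignment = B's index overwrite)
def pvC (country : String) (data : List (List (String × String))) (c : String) : String :=
  data.foldl (fun c x => if pvRM country x then pvCC x else c) c
def pvV (country y : String) (data : List (List (String × String))) (v : String) : String :=
  data.foldl (fun v x => if pvRM country x && pvYE y x then pvGD x else v) v
def pvLk (d : PySem.Dict String String) (y : String) : String :=
  match d.get? y with | some v => v | none => ""

lemma pvInsC (cc c v1 v2 v3 v4 v5 v6 v7 v8 v9 v10 : String) :
    PySem.Dict.insert (PySem.Dict.mk [("Country", c), ("1", v1), ("2", v2), ("3", v3), ("4", v4), ("5", v5), ("6", v6), ("7", v7), ("8", v8), ("9", v9), ("10", v10)]) "Country" cc = PySem.Dict.mk [("Country", cc), ("1", v1), ("2", v2), ("3", v3), ("4", v4), ("5", v5), ("6", v6), ("7", v7), ("8", v8), ("9", v9), ("10", v10)] := rfl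
lemma pvInsIf1 (b : Bool) (g c v1 v2 v3 v4 v5 v6 v7 v8 v9 v10 : String) :
    (if b then PySem.Dict.insert (PySem.Dict.mk [("Country", c), ("1", v1), ("2", v2), ("3", v3), ("4", v4), ("5", v5), ("6", v6), ("7", v7), ("8", v8), ("9", v9), ("10", v10)]) "1" g else PySem.Dict.mk [("Country", c), ("1", v1), ("2", v2), ("3", v3), ("4", v4), ("5", v5), ("6", v6), ("7", v7), ("8", v8), ("9", v9), ("10", v10)]) = PySem.Dict.mk [("Country", c), ("1", (if b then g else v1)), ("2", v2), ("3", v3), ("4", v4), ("5", v5), ("6", v6), ("7", v7), ("8", v8), ("9", v9), ("10", v10)] := by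
  cases b <;> rfl
lemma pvInsIf2 (b : Bool) (g c v1 v2 v3 v4 v5 v6 v7 v8 v9 v10 : String) :
    (if b then PySem.Dict.insert (PySem.Dict.mk [("Country", c), ("1", v1), ("2", v2), ("3", v3), ("4", v4), ("5", v5), ("6", v6), ("7", v7), ("8", v8), ("9", v9), ("10", v10)]) "2" g else PySem.Dict.mk [("Country", c), ("1", v1), ("2", v2), ("3", v3), ("4", v4), ("5", v5), ("6", v6), ("7", v7), ("8", v8), ("9", v9), ("10", v10)]) = PySem.Dict.mk [("Country", c), ("1", v1), ("2", (if b then g else v2)), ("3", v3), ("4", v4), ("5", v5), ("6", v6), ("7", v7), ("8", v8), ("9", v9), ("10", v10)] := by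
  cases b <;> rfl
lemma pvInsIf3 (b : Bool) (g c v1 v2 v3 v4 v5 v6 v7 v8 v9 v10 : String) :
    (if b then PySem.Dict.insert (PySem.Dict.mk [("Country", c), ("1", v1), ("2", v2), ("3", v3), ("4", v4), ("5", v5), ("6", v6), ("7", v7), ("8", v8), ("9", v9), ("10", v10)]) "3" g else PySem.Dict.mk [("Country", c), ("1", v1), ("2", v2), ("3", v3), ("4", v4), ("5", v5), ("6", v6), ("7", v7), ("8", v8), ("9", v9), ("10", v10)]) = PySem.Dict.mk [("Country", c), ("1", v1), ("2", v2), ("3", (if b then g else v3)), ("4", v4), ("5", v5), ("6", v6), ("7", v7), ("8", v8), ("9", v9), ("10", v10)] := by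
  cases b <;> rfl
lemma pvInsIf4 (b : Bool) (g c v1 v2 v3 v4 v5 v6 v7 v8 v9 v10 : String) :
    (if b then PySem.Dict.insert (PySem.Dict.mk [("Country", c), ("1", v1), ("2", v2), ("3", v3), ("4", v4), ("5", v5), ("6", v6), ("7", v7), ("8", v8), ("9", v9), ("10", v10)]) "4" g else PySem.Dict.mk [("Country", c), ("1", v1), ("2", v2), ("3", v3), ("4", v4), ("5", v5), ("6", v6), ("7", v7), ("8", v8), ("9", v9), ("10", v10)]) = PySem.Dict.mk [("Country", c), ("1", v1), ("2", v2), ("3", v3), ("4", (if b then g else v4)), ("5", v5), ("6", v6), ("7", v7), ("8", v8), ("9", v9), ("10", v10)] := by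
  cases b <;> rfl
lemma pvInsIf5 (b : Bool) (g c v1 v2 v3 v4 v5 v6 v7 v8 v9 v10 : String) :
    (if b then PySem.Dict.insert (PySem.Dict.mk [("Country", c), ("1", v1), ("2", v2), ("3", v3), ("4", v4), ("5", v5), ("6", v6), ("7", v7), ("8", v8), ("9", v9), ("10", v10)]) "5" g else PySem.Dict.mk [("Country", c), ("1", v1), ("2", v2), ("3", v3), ("4", v4), ("5", v5), ("6", v6), ("7", v7), ("8", v8), ("9", v9), ("10", v10)]) = PySem.Dict.mk [("Country", c), ("1", v1), ("2", v2), ("3", v3), ("4", v4), ("5", (if b then g else v5)), ("6", v6), ("7", v7), ("8", v8), ("9", v9), ("10", v10)] := by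
  cases b <;> rfl
lemma pvInsIf6 (b : Bool) (g c v1 v2 v3 v4 v5 v6 v7 v8 v9 v10 : String) :
    (if b then PySem.Dict.insert (PySem.Dict.mk [("Country", c), ("1", v1), ("2", v2), ("3", v3), ("4", v4), ("5", v5), ("6", v6), ("7", v7), ("8", v8), ("9", v9), ("10", v10)]) "6" g else PySem.Dict.mk [("Country", c), ("1", v1), ("2", v2), ("3", v3), ("4", v4), ("5", v5), ("6", v6), ("7", v7), ("8", v8), ("9", v9), ("10", v10)]) = PySem.Dict.mk [("Country", c), ("1", v1), ("2", v2), ("3", v3), ("4", v4), ("5", v5), ("6", (if b then g else v6)), ("7", v7), ("8", v8), ("9", v9), ("10", v10)] := by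
  cases b <;> rfl
lemma pvInsIf7 (b : Bool) (g c v1 v2 v3 v4 v5 v6 v7 v8 v9 v10 : String) :
    (if b then PySem.Dict.insert (PySem.Dict.mk [("Country", c), ("1", v1), ("2", v2), ("3", v3), ("4", v4), ("5", v5), ("6", v6), ("7", v7), ("8", v8), ("9", v9), ("10", v10)]) "7" g else PySem.Dict.mk [("Country", c), ("1", v1), ("2", v2), ("3", v3), ("4", v4), ("5", v5), ("6", v6), ("7", v7), ("8", v8), ("9", v9), ("10", v10)]) = PySem.Dict.mk [("Country", c), ("1", v1), ("2", v2), ("3", v3), ("4", v4), ("5", v5), ("6", v6), ("7", (if b then g else v7)), ("8", v8), ("9", v9), ("10", v10)] := by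
  cases b <;> rfl
lemma pvInsIf8 (b : Bool) (g c v1 v2 v3 v4 v5 v6 v7 v8 v9 v10 : String) :
    (if b then PySem.Dict.insert (PySem.Dict.mk [("Country", c), ("1", v1), ("2", v2), ("3", v3), ("4", v4), ("5", v5), ("6", v6), ("7", v7), ("8", v8), ("9", v9), ("10", v10)]) "8" g else PySem.Dict.mk [("Country", c), ("1", v1), ("2", v2), ("3", v3), ("4", v4), ("5", v5), ("6", v6), ("7", v7), ("8", v8), ("9", v9), ("10", v10)]) = PySem.Dict.mk [("Country", c), ("1", v1), ("2", v2), ("3", v3), ("4", v4), ("5", v5), ("6", v6), ("7", v7), ("8", (if b then g else v8)), ("9", v9), ("10", v10)] := by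
  cases b <;> rfl
lemma pvInsIf9 (b : Bool) (g c v1 v2 v3 v4 v5 v6 v7 v8 v9 v10 : String) :
    (if b then PySem.Dict.insert (PySem.Dict.mk [("Country", c), ("1", v1), ("2", v2), ("3", v3), ("4", v4), ("5", v5), ("6", v6), ("7", v7), ("8", v8), ("9", v9), ("10", v10)]) "9" g else PySem.Dict.mk [("Country", c), ("1", v1), ("2", v2), ("3", v3), ("4", v4), ("5", v5), ("6", v6), ("7", v7), ("8", v8), ("9", v9), ("10", v10)]) = PySem.Dict.mk [("Country", c), ("1", v1), ("2", v2), ("3", v3), ("4", v4), ("5", v5), ("6", v6), ("7", v7), ("8", v8), ("9", (if b then g else v9)), ("10", v10)] := by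
  cases b <;> rfl
lemma pvInsIf10 (b : Bool) (g c v1 v2 v3 v4 v5 v6 v7 v8 v9 v10 : String) :
    (if b then PySem.Dict.insert (PySem.Dict.mk [("Country", c), ("1", v1), ("2", v2), ("3", v3), ("4", v4), ("5", v5), ("6", v6), ("7", v7), ("8", v8), ("9", v9), ("10", v10)]) "10" g else PySem.Dict.mk [("Country", c), ("1", v1), ("2", v2), ("3", v3), ("4", v4), ("5", v5), ("6", v6), ("7", v7), ("8", v8), ("9", v9), ("10", v10)]) = PySem.Dict.mk [("Country", c), ("1", v1), ("2", v2), ("3", v3), ("4", v4), ("5", v5), ("6", v6), ("7", v7), ("8", v8), ("9", v9), ("10", (if b then g else v10))] := by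
  cases b <;> rfl

lemma pvStepA_shape (country : String) (year : Int) (x : List (String × String)) (c v1 v2 v3 v4 v5 v6 v7 v8 v9 v10 : String) :
    pvStepA country year (PySem.Dict.mk [("Country", c), ("1", v1), ("2", v2), ("3", v3), ("4", v4), ("5", v5), ("6", v6), ("7", v7), ("8", v8), ("9", v9), ("10", v10)]) x = PySem.Dict.mk [("Country", (if pvRM country x then pvCC x else c)), ("1", (if pvRM country x && pvYE (PySem.Int.toStr (year)) x then pvGD x else v1)), ("2", (if pvRM country x && pvYE (PySem.Int.toStr (year + 1)) x then pvGD x else v2)), ("3", (if pvRM country x && pvYE (PySem.Int.toStr (year + 2)) x then pvGD x else v3)), ("4", (if pvRM country x && pvYE (PySem.Int.toStr (year + 3)) x then pvGD x else v4)), ("5", (if pvRM country x && pvYE (PySem.Int.toStr (year + 4)) x then pvGD x else v5)), ("6", (if pvRM country x && pvYE (PySem.Int.toStr (year + 5)) x then pvGD x else v6)), ("7", (if pvRM country x && pvYE (PySem.Int.toStr (year + 6)) x then pvGD x else v7)), ("8", (if pvRM country x && pvYE (PySem.Int.toStr (year + 7)) x then pvGD x else v8)), ("9", (if pvRM country x &&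 pvYE (PySem.Int.toStr (year + 8)) x then pvGD x else v9)), ("10", (if pvRM country x && pvYE (PySem.Int.toStr (year + 9)) x then pvGD x else v10))] := by
  cases h : pvRM country x with
  | false =>
    simp only [pvRM] at h
    simp only [pvStepA, h, Bool.false_eq_true, if_false, Bool.false_and]
  | true =>
    simp only [pvRM] at h
    simp only [pvStepA, h, if_true]
    rw [pvInsC, pvInsIf1, pvInsIf2, pvInsIf3, pvInsIf4, pvInsIf5, pvInsIf6, pvInsIf7, pvInsIf8, pvInsIf9, pvInsIf10]
    simp only [pvYE, pvGD, pvCC, Bool.true_and]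

lemma pvFoldA (country : String) (year : Int) (data : List (List (String × String))) :
    ∀ (c v1 v2 v3 v4 v5 v6 v7 v8 v9 v10 : String),
    data.foldl (pvStepA country year) (PySem.Dict.mk [("Country", c), ("1", v1), ("2", v2), ("3", v3), ("4", v4), ("5", v5), ("6", v6), ("7", v7), ("8", v8), ("9", v9), ("10", v10)]) = PySem.Dict.mk [("Country", pvC country data c), ("1", pvV country (PySem.Int.toStr (year)) data v1), ("2", pvV country (PySem.Int.toStr (year + 1)) data v2), ("3", pvV country (PySem.Int.toStr (year + 2)) data v3), ("4", pvV country (PySem.Int.toStr (year + 3)) data v4), ("5", pvV country (PySem.Int.toStr (year + 4)) data v5), ("6", pvV country (PySem.Int.toStr (year + 5)) data v6), ("7", pvV country (PySem.Int.toStr (year + 6)) data v7), ("8", pvV country (PySem.Int.toStr (year + 7)) data v8), ("9", pvV country (PySem.Int.toStr (year + 8)) data v9), ("10", pvV country (PySem.Int.toStr (year + 9)) data v10)] := by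
  induction data with
  | nil => intro c v1 v2 v3 v4 v5 v6 v7 v8 v9 v10; rfl
  | cons x l ih =>
    intro c v1 v2 v3 v4 v5 v6 v7 v8 v9 v10
    rw [List.foldl_cons, pvStepA_shape, ih]
    simp only [pvC, pvV, List.foldl_cons]

lemma pvCC_of_rm (country : String) (x : List (String × String)) (h : pvRM country x = true) :
    pvCC x = country := by
  simp only [pvRM, beq_iff_eq] at h
  simp only [pvCC]
  exact PySem.Dict.getD_of_get?_eq_some _ "" h

lemma pvC_eq (country : String) (data : List (List (String × String))) :
    ∀ c : String, pvC country data c = if data.any (pvRM country) then country else c := by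
  induction data with
  | nil => intro c; rfl
  | cons x l ih =>
    intro c
    simp only [pvC, List.foldl_cons, List.any_cons]
    by_cases h : pvRM country x = true
    · rw [if_pos h, pvCC_of_rm country x h]
      have := ih country
      simp only [pvC, ite_self] at this
      simp [h, this]
    · have hb : pvRM country x = false := by revert h; cases pvRM country x <;> simp
      rw [if_neg h]
      simp only [hb, Bool.false_or]
      simpa only [pvC] using ih c

lemma pvFoldB_snd (country : String) (data : List (List (String × String))) :
    ∀ p : PySem.Dict String String × Bool,
    (data.foldl (pvStepB country) p).2 = (p.2 || data.any (pvRM country)) := by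
  induction data with
  | nil => intro p; simp
  | cons x l ih =>
    intro p
    rw [List.foldl_cons]
    cases h : pvRM country x with
    | false =>
      simp only [pvRM] at h
      simp only [pvStepB, h, Bool.false_eq_true, if_false, ih p, List.any_cons, pvRM, Bool.false_or]
    | true =>
      simp only [pvRM] at h
      simp only [pvStepB, h, if_true, ih, List.any_cons, pvRM, Bool.true_or, Bool.or_true]

lemma pvLk_insert (d : PySem.Dict String String) (k v y : String) :
    pvLk (d.insert k v) y = if y = k then v else pvLk d y := by
  simp only [pvLk, PySem.Dict.get?_insert]
  by_cases h : y = k <;> simp [h]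

lemma pvFoldB_lk (country : String) (data : List (List (String × String))) (y : String) :
    ∀ (idx : PySem.Dict String String) (seen : Bool),
    pvLk (data.foldl (pvStepB country) (idx, seen)).1 y = pvV country y data (pvLk idx y) := by
  induction data with
  | nil => intro idx seen; rfl
  | cons x l ih =>
    intro idx seen
    rw [List.foldl_cons]
    simp only [pvV, List.foldl_cons]
    cases h : pvRM country x with
    | false =>
      simp only [pvRM] at h
      simp only [pvStepB, h, Bool.false_eq_true, if_false]
      simpa only [pvRM, h, Bool.false_and, Bool.false_eq_true, if_false, pvV] using ih idx seen
    | true =>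
      have h' := h
      simp only [pvRM] at h'
      simp only [pvStepB, h', if_true]
      cases hY : (PySem.Dict.ofList x).get? "Year" with
      | none =>
        simpa only [h, pvYE, hY, Bool.true_and, pvV,
          (by simp : ((none : Option String) == some y) = false), Bool.false_eq_true, if_false] using ih idx true
      | some yx =>
        have := ih (idx.insert yx ((PySem.Dict.ofList x).getD "gdppc" "")) true
        rw [pvLk_insert] at this
        simp only [pvV] at this
        rw [this]
        simp only [pvYE, hY, Bool.true_and, pvGD]
        by_cases hxy : y = yx
        · simp [hxy]
        · have : (some yx == some y) = false := by
            simp; exact fun hh => hxy hh.symm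
          simp [hxy, this]

lemma pvInsNew1 (s w1 : String) :
    PySem.Dict.insert (PySem.Dict.mk [("Country", s)]) "1" w1 = PySem.Dict.mk [("Country", s), ("1", w1)] := rfl

lemma pvInsNew2 (s w1 w2 : String) :
    PySem.Dict.insert (PySem.Dict.mk [("Country", s), ("1", w1)]) "2" w2 = PySem.Dict.mk [("Country", s), ("1", w1), ("2", w2)] := rfl

lemma pvInsNew3 (s w1 w2 w3 : String) :
    PySem.Dict.insert (PySem.Dict.mk [("Country", s), ("1", w1), ("2", w2)]) "3" w3 = PySem.Dict.mk [("Country", s), ("1", w1), ("2", w2), ("3", w3)] := rfl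

lemma pvInsNew4 (s w1 w2 w3 w4 : String) :
    PySem.Dict.insert (PySem.Dict.mk [("Country", s), ("1", w1), ("2", w2), ("3", w3)]) "4" w4 = PySem.Dict.mk [("Country", s), ("1", w1), ("2", w2), ("3", w3), ("4", w4)] := rfl

lemma pvInsNew5 (s w1 w2 w3 w4 w5 : String) :
    PySem.Dict.insert (PySem.Dict.mk [("Country", s), ("1", w1), ("2", w2), ("3", w3), ("4", w4)]) "5" w5 = PySem.Dict.mk [("Country", s), ("1", w1), ("2", w2), ("3", w3), ("4", w4), ("5", w5)] := rfl

lemma pvInsNew6 (s w1 w2 w3 w4 w5 w6 : String) :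
    PySem.Dict.insert (PySem.Dict.mk [("Country", s), ("1", w1), ("2", w2), ("3", w3), ("4", w4), ("5", w5)]) "6" w6 = PySem.Dict.mk [("Country", s), ("1", w1), ("2", w2), ("3", w3), ("4", w4), ("5", w5), ("6", w6)] := rfl

lemma pvInsNew7 (s w1 w2 w3 w4 w5 w6 w7 : String) :
    PySem.Dict.insert (PySem.Dict.mk [("Country", s), ("1", w1), ("2", w2), ("3", w3), ("4", w4), ("5", w5), ("6", w6)]) "7" w7 = PySem.Dict.mk [("Country", s), ("1", w1), ("2", w2), ("3", w3), ("4", w4), ("5", w5), ("6", w6), ("7", w7)] := rfl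

lemma pvInsNew8 (s w1 w2 w3 w4 w5 w6 w7 w8 : String) :
    PySem.Dict.insert (PySem.Dict.mk [("Country", s), ("1", w1), ("2", w2), ("3", w3), ("4", w4), ("5", w5), ("6", w6), ("7", w7)]) "8" w8 = PySem.Dict.mk [("Country", s), ("1", w1), ("2", w2), ("3", w3), ("4", w4), ("5", w5), ("6", w6), ("7", w7), ("8", w8)] := rfl

lemma pvInsNew9 (s w1 w2 w3 w4 w5 w6 w7 w8 w9 : String) :
    PySem.Dict.insert (PySem.Dict.mk [("Country", s), ("1", w1), ("2", w2), ("3", w3), ("4", w4), ("5", w5), ("6", w6), ("7", w7), ("8", w8)]) "9" w9 = PySem.Dict.mk [("Country", s), ("1", w1), ("2", w2), ("3", w3), ("4", w4), ("5", w5), ("6", w6), ("7", w7), ("8", w8), ("9", w9)] := rfl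

lemma pvInsNew10 (s w1 w2 w3 w4 w5 w6 w7 w8 w9 w10 : String) :
    PySem.Dict.insert (PySem.Dict.mk [("Country", s), ("1", w1), ("2", w2), ("3", w3), ("4", w4), ("5", w5), ("6", w6), ("7", w7), ("8", w8), ("9", w9)]) "10" w10 = PySem.Dict.mk [("Country", s), ("1", w1), ("2", w2), ("3", w3), ("4", w4), ("5", w5), ("6", w6), ("7", w7), ("8", w8), ("9", w9), ("10", w10)] := rfl

lemma pvB_out (idx : PySem.Dict String String) (s : String) (year : Int) :
    ((PySem.List.pyRange 0 10 1).foldl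
      (fun hold i => hold.insert (PySem.Int.toStr (i+1))
        (match idx.get? (PySem.Int.toStr (year+i)) with | some v => v | none => ""))
      (PySem.Dict.mk [("Country", s)])).items
    = [("Country", s), ("1", pvLk idx (PySem.Int.toStr (year))), ("2", pvLk idx (PySem.Int.toStr (year + 1))), ("3", pvLk idx (PySem.Int.toStr (year + 2))), ("4", pvLk idx (PySem.Int.toStr (year + 3))), ("5", pvLk idx (PySem.Int.toStr (year + 4))), ("6", pvLk idx (PySem.Int.toStr (year + 5))), ("7", pvLk idx (PySem.Int.toStr (year + 6))), ("8", pvLk idx (PySem.Int.toStr (year + 7))), ("9", pvLk idx (PySem.Int.toStr (year + 8))), ("10", pvLk idx (PySem.Int.toStr (year + 9)))] := by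
  have hR : PySem.List.pyRange 0 10 1 = ([0,1,2,3,4,5,6,7,8,9] : List Int) := by decide
  rw [hR]
  simp only [List.foldl_cons, List.foldl_nil]
  norm_num
  rw [(by decide : PySem.Int.toStr 1 = "1"), (by decide : PySem.Int.toStr 2 = "2"), (by decide : PySem.Int.toStr 3 = "3"), (by decide : PySem.Int.toStr 4 = "4"), (by decide : PySem.Int.toStr 5 = "5"), (by decide : PySem.Int.toStr 6 = "6"), (by decide : PySem.Int.toStr 7 = "7"), (by decide : PySem.Int.toStr 8 = "8"), (by decide : PySem.Int.toStr 9 = "9"), (by decide : PySem.Int.toStr 10 = "10")]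
  rw [pvInsNew1, pvInsNew2, pvInsNew3, pvInsNew4, pvInsNew5, pvInsNew6, pvInsNew7, pvInsNew8, pvInsNew9, pvInsNew10]
  rfl

lemma pvLk_empty (y : String) : pvLk (PySem.Dict.empty) y = "" := rfl

-- ===== VERDICT (by name: the statement is the Claim_ definition above) =====
theorem getTenYearInt_spec : Claim_equal_getTenYearInt := by
  intro data country year _hdom _hpre
  unfold Spec_getTenYearInt
  simp only [getTenYearInt, getTenYearInt_alt]
  rw [pvFoldA, pvB_out, pvFoldB_snd, pvC_eq]
  simp only [pvFoldB_lk, pvLk_empty, Bool.false_or]
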